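-- pv_equiv track=rewrite | github.com/yechankun/Algorithm | dp/230415_pg_lv4_사칙연산.py | solution
-- ===== SOURCE A (Python) =====
-- def solution(arr):
--     # 최댓값과 최솟값을 갱신하면서 계산해야 된다.
--     # 왜냐하면 -가 되면 최소값이 최대값이 되기 때문
--     # 그렇게 되면 최소값과 최대값을 서로 교환한다.
--
--     cmin, cmax = 0, 0  # 최소, 최대값
--     psum, last = 0, 0
--     for i in arr[::-1]:
--         if i == "-":
--             nmin = min(
--                 -(last + psum + cmax),
--                 -(last + psum) + cmin
--             )
--             nmax = max(
--                 -(last + psum + cmin),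
--                 -(last) + psum + cmax
--             )
--             psum, last = 0, 0
--             cmin, cmax = nmin, nmax
--         elif i != '+':
--             psum += last
--             last = int(i)
--     answer = psum + last + cmax
--     return answer
-- ===== SOURCE B (Python) =====
-- def solution(arr):
--     # Segment DP: tokenize the expression into '-'-separated groups of numbers,
--     # then fold a (min,max) update over the groups right-to-left.  At each '-'
--     # the minus can either be parenthesized over everything to its right, or
--     # bind only its adjacent number, leaving the rest to be maximized/minimized.
--     segs = _split(arr)
--     cmin, cmax = 0, 0
--     for seg in reversed(segs[1:]):
--         head = seg[0] if seg else 0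
--         rest = sum(seg[1:])
--         nmin = min(-(head + rest + cmax), -(head + rest) + cmin)
--         nmax = max(-(head + rest + cmin), -head + rest + cmax)
--         cmin, cmax = nmin, nmax
--     return sum(segs[0]) + cmax
--
-- def _split(arr):
--     # '-'-separated segments of parsed numbers; '+' separators are dropped
--     if not arr:
--         return [[]]
--     segs = _split(arr[1:])
--     t = arr[0]
--     if t == "-":
--         return [[]] + segs
--     if t == "+":
--         return segs
--     return [[int(t)] + segs[0]] + segs[1:]
-- ===== Notes on version B (the rewrite author's own statement) =====
-- stated objective: alternative
-- what changed: B first splits the token list into '-'-separated segments of parsed numbers and then folds a (min,max) DP update over the segments right-to-left (each '-' either parenthesized over the whole right part or binding only its adjacent number), instead of A's single reversed token scan threading four state variables (cmin, cmax, psum, last).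
import Mathlib
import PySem

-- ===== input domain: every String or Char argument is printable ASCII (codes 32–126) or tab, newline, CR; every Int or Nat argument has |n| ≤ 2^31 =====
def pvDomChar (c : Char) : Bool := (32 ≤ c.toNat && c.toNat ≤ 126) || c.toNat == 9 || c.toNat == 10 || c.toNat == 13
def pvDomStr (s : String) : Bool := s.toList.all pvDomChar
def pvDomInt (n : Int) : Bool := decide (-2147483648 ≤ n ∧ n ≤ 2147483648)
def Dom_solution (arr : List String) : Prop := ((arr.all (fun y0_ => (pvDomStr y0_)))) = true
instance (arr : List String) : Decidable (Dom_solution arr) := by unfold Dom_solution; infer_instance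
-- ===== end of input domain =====

-- B restructures A's four-variable right-to-left token scan into a split-into-segments
-- pass followed by a fold of (min,max) DP updates over the segments (objective:
-- alternative; same linear cost).

-- ===== PORT A =====
-- loop body of A's 'for i in arr[::-1]'; state is (cmin, cmax, psum, last).
-- int(i) is PySem.Int.ofStr?; Pre_ excludes tokens where it is none (Python ValueError).
def aStep (st : Int × Int × Int × Int) (i : String) : Int × Int × Int × Int :=
  let (cmin, cmax, psum, last) := st
  if i = "-" then
    let nmin := min (-(last + psum + cmax)) (-(last + psum) + cmin)
    let nmax := max (-(last + psum + cmin)) (-(last) + psum + cmax)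
    (nmin, nmax, 0, 0)
  else if i ≠ "+" then
    (cmin, cmax, psum + last, (PySem.Int.ofStr? i).getD 0)
  else
    (cmin, cmax, psum, last)

def solution (arr : List String) : Int :=
  -- arr[::-1]
  let st := ((PySem.List.slice? arr none none (-1)).getD []).foldl aStep (0, 0, 0, 0)
  st.2.2.1 + st.2.2.2 + st.2.1

-- ===== PORT B =====
-- _split in Source B: '-'-separated segments of parsed numbers ('+' tokens dropped)
def pvSplit : List String → List (List Int)
  | [] => [[]]
  | t :: rest =>
    let segs := pvSplit rest
    if t = "-" then [] :: segs
    else if t = "+" then segs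
    else (((PySem.Int.ofStr? t).getD 0) :: segs.headD []) :: segs.tail

-- body of Source B's 'for seg in reversed(segs[1:])'; state is (cmin, cmax)
def bStep (st : Int × Int) (seg : List Int) : Int × Int :=
  let (cmin, cmax) := st
  let head := seg.headD 0
  let rest := seg.tail.sum
  (min (-(head + rest + cmax)) (-(head + rest) + cmin),
   max (-(head + rest + cmin)) (-head + rest + cmax))

def solution_alt (arr : List String) : Int :=
  let segs := pvSplit arr
  let st := (segs.tail.reverse).foldl bStep (0, 0)
  (segs.headD []).sum + st.2

-- ===== PRECONDITION & SPEC =====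
-- Pre_ excludes exactly the inputs where A raises ValueError: a token other than
-- "-"/"+" that is not a valid Python int literal.
def Pre_solution (arr : List String) : Prop :=
  ∀ s ∈ arr, s = "-" ∨ s = "+" ∨ (PySem.Int.ofStr? s).isSome = true
instance (arr : List String) : Decidable (Pre_solution arr) := by unfold Pre_solution; infer_instance

def pvWitness_solution : List String := ["5", "-", "3", "+", "2", "-", "4"]

def Spec_solution (arr : List String) (out : Int) : Prop := out = solution_alt arr
instance (arr : List String) (out : Int) : Decidable (Spec_solution arr out) := by unfold Spec_solution; infer_instance

-- ===== CLAIM (what is proved, stated in full; the proofs are below) =====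
def Claim_equal_solution : Prop := ∀ (arr : List String), Dom_solution arr → Pre_solution arr → Spec_solution arr (solution arr)

-- ===== LEMMAS AND PROOFS =====

-- processing one more element at the head of the (reversed) list applies the step last
theorem foldl_reverse_cons {α β : Type} (f : β → α → β) (s : β) (x : α) (xs : List α) :
    (x :: xs).reverse.foldl f s = f (xs.reverse.foldl f s) x := by
  simp [List.reverse_cons, List.foldl_append]

theorem pvSplit_ne_nil (arr : List String) : pvSplit arr ≠ [] := by
  induction arr with
  | nil => simp [pvSplit]
  | cons t rest ih =>
    simp only [pvSplit]
    split_ifs <;> simp [ih]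

-- invariant tying A's four-variable state to B's segments
theorem state_invariant (arr : List String) :
    arr.reverse.foldl aStep (0, 0, 0, 0) =
      (let segs := pvSplit arr
       let p := (segs.tail.reverse).foldl bStep (0, 0)
       (p.1, p.2, (segs.headD []).tail.sum, (segs.headD []).headD 0)) := by
  induction arr with
  | nil => simp [pvSplit]
  | cons t rest ih =>
    rw [foldl_reverse_cons, ih]
    by_cases h1 : t = "-"
    · subst h1
      simp only [pvSplit, aStep]
      cases hs : pvSplit rest with
      | nil => simp [pvSplit_ne_nil rest] at hs
      | cons s0 ss =>
        simp only [List.tail_cons, List.headD_cons, foldl_reverse_cons, bStep,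
          reduceIte, Prod.mk.injEq]
        cases s0 <;> simp <;> constructor <;> (try constructor) <;> omega
    · by_cases h2 : t = "+"
      · subst h2
        simp [pvSplit, aStep]
      · simp only [pvSplit, aStep, if_neg h1, if_neg h2, ne_eq]
        cases hs : pvSplit rest with
        | nil => simp [pvSplit_ne_nil rest] at hs
        | cons s0 ss =>
          simp only [List.tail_cons, List.headD_cons, if_pos h2, Prod.mk.injEq]
          cases s0 <;> simp <;> omega

-- ===== VERDICT (by name: the statement is the Claim_ definition above) =====
theorem solution_spec : Claim_equal_solution := by
  intro arr _ _
  unfold Spec_solution solution solution_alt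
  rw [PySem.List.slice?_none_none_neg_one]
  simp only [Option.getD_some]
  rw [state_invariant]
  cases hs : pvSplit arr with
  | nil => simp [pvSplit_ne_nil arr] at hs
  | cons s0 ss =>
    cases s0 <;> simp <;> omega
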